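-- pv_equiv track=rewrite | github.com/weizb18/AI_project1 | board.py | available_row_range
-- ===== SOURCE A (Python) =====
-- def available_row_range(row, obj_col):    # input: row is a vector, obj_col is the col of the obj
--                                                 # return: available columns in a row
--     start_col = 0
--     end_col = obj_col + 1
--     for cnt in range(obj_col):
--         if row[cnt] != 0:
--             start_col = cnt + 1
--     for cnt in range(obj_col+1, len(row)):
--         if row[cnt] == 0:
--             end_col = cnt + 1
--         else:
--             end_col = cnt
--             break
--     col_list = list(range(start_col, end_col))
--     col_list.remove(obj_col)
--     return col_list
-- ===== SOURCE B (Python) =====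
-- def available_row_range(row, obj_col):
--     left = right = obj_col
--     while left > 0 and row[left - 1] == 0:
--         left -= 1
--     while right + 1 < len(row) and row[right + 1] == 0:
--         right += 1
--     return [c for c in range(left, right + 1) if c != obj_col]
-- ===== Notes on version B (the rewrite author's own statement) =====
-- stated objective: simpler
-- what changed: Replaces A's two index-range for-loops (a full rescan of all columns left of obj_col plus a break-driven scan with a separate end_col variable and a final list.remove) by a symmetric two-pointer walk that grows [left, right] outward from obj_col while cells are zero and filters obj_col out of the range.
import Mathlib
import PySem

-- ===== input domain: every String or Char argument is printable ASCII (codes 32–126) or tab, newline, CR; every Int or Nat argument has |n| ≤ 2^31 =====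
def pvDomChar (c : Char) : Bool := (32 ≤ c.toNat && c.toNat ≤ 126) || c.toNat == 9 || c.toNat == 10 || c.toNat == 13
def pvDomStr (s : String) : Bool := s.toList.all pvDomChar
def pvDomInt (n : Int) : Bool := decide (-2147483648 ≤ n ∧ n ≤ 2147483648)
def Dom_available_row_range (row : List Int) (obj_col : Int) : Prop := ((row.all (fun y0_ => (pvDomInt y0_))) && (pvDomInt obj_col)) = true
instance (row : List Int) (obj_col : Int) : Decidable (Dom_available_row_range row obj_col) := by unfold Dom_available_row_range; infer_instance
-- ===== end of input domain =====

-- B replaces A's two index-range for-loops (full left rescan + break-driven right scan + list.remove)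
-- by a symmetric two-pointer walk growing [left, right] outward from obj_col; objective: simpler.

-- ===== PORT A =====
-- body of A's first for-loop (start_col update)
def arrLoop1Body (row : List Int) (start_col cnt : Int) : Int :=
  if PySem.List.pyGetD row cnt 0 ≠ 0 then cnt + 1 else start_col

-- body of A's second for-loop; the Bool is the 'break' flag (True = loop broken, state frozen)
def arrLoop2Body (row : List Int) (st : Int × Bool) (cnt : Int) : Int × Bool :=
  if st.2 then st
  else if PySem.List.pyGetD row cnt 0 = 0 then (cnt + 1, false)
  else (cnt, true)

def available_row_range (row : List Int) (obj_col : Int) : List Int :=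
  let start_col : Int :=
    (PySem.List.pyRange 0 obj_col 1).foldl (arrLoop1Body row) 0
  let st : Int × Bool :=
    (PySem.List.pyRange (obj_col + 1) (row.length : Int) 1).foldl (arrLoop2Body row)
      (obj_col + 1, false)
  let end_col := st.1
  let col_list := PySem.List.pyRange start_col end_col 1
  -- col_list.remove(obj_col); under Pre_ obj_col is always a member, so the getD default is never used
  (PySem.List.remove? col_list obj_col).getD col_list

-- ===== PORT B =====
-- while left > 0 and row[left-1] == 0: left -= 1
def growLeft (row : List Int) (left : Int) : Int :=
  if 0 < left ∧ PySem.List.pyGetD row (left - 1) 0 = 0 then growLeft row (left - 1) else left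
termination_by left.toNat
decreasing_by omega

-- while right + 1 < len(row) and row[right+1] == 0: right += 1
def growRight (row : List Int) (right : Int) : Int :=
  if right + 1 < (row.length : Int) ∧ PySem.List.pyGetD row (right + 1) 0 = 0 then
    growRight row (right + 1)
  else right
termination_by ((row.length : Int) - right).toNat
decreasing_by omega

def available_row_range_alt (row : List Int) (obj_col : Int) : List Int :=
  let left := growLeft row obj_col
  let right := growRight row obj_col
  (PySem.List.pyRange left (right + 1) 1).filter (fun c => c ≠ obj_col)

-- ===== PRECONDITION & SPEC =====
-- Pre_ excludes exactly the inputs where the Python A raises: obj_col < 0 makes the final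
-- list.remove raise ValueError, and obj_col > len(row) makes row[cnt] raise IndexError.
def Pre_available_row_range (row : List Int) (obj_col : Int) : Prop :=
  0 ≤ obj_col ∧ obj_col ≤ (row.length : Int)
instance (row : List Int) (obj_col : Int) : Decidable (Pre_available_row_range row obj_col) := by
  unfold Pre_available_row_range; infer_instance

def pvWitness_available_row_range : List Int × Int := ([0, 1, 0, 0], 2)

def Spec_available_row_range (row : List Int) (obj_col : Int) (out : List Int) : Prop :=
  out = available_row_range_alt row obj_col
instance (row : List Int) (obj_col : Int) (out : List Int) : Decidable (Spec_available_row_range row obj_col out) := by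
  unfold Spec_available_row_range; infer_instance

-- ===== CLAIM (what is proved, stated in full; the proofs are below) =====
def Claim_equal_available_row_range : Prop := ∀ (row : List Int) (obj_col : Int), Dom_available_row_range row obj_col → Pre_available_row_range row obj_col → Spec_available_row_range row obj_col (available_row_range row obj_col)

-- ===== LEMMAS AND PROOFS =====

-- A's first loop computes exactly B's left pointer
theorem loop1_eq_growLeft (row : List Int) (k : Nat) :
    (PySem.List.pyRange 0 (k : Int) 1).foldl (arrLoop1Body row) 0 = growLeft row (k : Int) := by
  induction k with
  | zero => simp [PySem.List.pyRange_one_eq_nil, growLeft]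
  | succ k ih =>
      have h : ((k : Int) + 1) = ((k + 1 : Nat) : Int) := by push_cast; ring
      rw [← h, PySem.List.pyRange_one_succ_right (by positivity), List.foldl_append]
      simp only [List.foldl, arrLoop1Body, ih]
      conv_rhs => rw [growLeft]
      have hc : (k : Int) + 1 - 1 = (k : Int) := by ring
      by_cases hz : row[k]?.getD 0 = 0 <;>
        simp [hz, hc, PySem.List.pyGetD_natCast, show (0:Int) < (k:Int) + 1 by positivity]

-- once the break flag is set the fold keeps the frozen state
theorem loop2_frozen (row : List Int) (l : List Int) (e : Int) :
    l.foldl (arrLoop2Body row) (e, true) = (e, true) := by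
  induction l with
  | nil => rfl
  | cons x xs ih => simpa [arrLoop2Body] using ih

-- A's second loop's end_col is exactly B's right pointer + 1
theorem loop2_eq_growRight (row : List Int) (r : Nat) :
    ((PySem.List.pyRange ((r : Int) + 1) (row.length : Int) 1).foldl (arrLoop2Body row)
      ((r : Int) + 1, false)).1 = growRight row (r : Int) + 1 := by
  by_cases h : r + 1 < row.length
  · have hlt : (r : Int) + 1 < (row.length : Int) := by exact_mod_cast h
    rw [PySem.List.pyRange_one_cons hlt, growRight]
    simp only [List.foldl, arrLoop2Body]
    by_cases hz : PySem.List.pyGetD row ((r : Int) + 1) 0 = 0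
    · simp only [hz, hlt, and_self, if_true]
      rw [show ((r : Int) + 1 + 1) = (((r + 1 : Nat)) : Int) + 1 by push_cast; ring]
      exact loop2_eq_growRight row (r + 1)
    · simp [hz, loop2_frozen]
  · have hle : (row.length : Int) ≤ (r : Int) + 1 := by exact_mod_cast Nat.not_lt.mp h
    rw [PySem.List.pyRange_one_eq_nil hle, growRight]
    simp
    omega
termination_by row.length - r

theorem growLeft_le (row : List Int) (x : Int) : growLeft row x ≤ x := by
  rw [growLeft]
  split
  · have := growLeft_le row (x - 1)
    omega
  · omega
termination_by x.toNat
decreasing_by omega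

theorem le_growRight (row : List Int) (x : Int) : x ≤ growRight row x := by
  rw [growRight]
  split
  · have := le_growRight row (x + 1)
    omega
  · omega
termination_by ((row.length : Int) - x).toNat
decreasing_by omega

-- removing k from a duplicate-free increasing range is the same as filtering it out
theorem range_erase_eq_filter (a b k : Int) (ha : a ≤ k) (hb : k < b) :
    (PySem.List.pyRange a b 1).erase k = (PySem.List.pyRange a b 1).filter (fun c => c ≠ k) := by
  rw [PySem.List.pyRange_one_append a k b ha (by omega),
      PySem.List.pyRange_one_cons hb]
  have hnot : k ∉ PySem.List.pyRange a k 1 := by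
    simp [PySem.List.mem_pyRange_one]
  rw [List.erase_append_right _ hnot, List.erase_cons_head]
  rw [List.filter_append]
  have h1 : (PySem.List.pyRange a k 1).filter (fun c => c ≠ k) = PySem.List.pyRange a k 1 := by
    rw [List.filter_eq_self]
    intro x hx
    have := (PySem.List.mem_pyRange_one).mp hx
    simp; omega
  have h2 : (k :: PySem.List.pyRange (k + 1) b 1).filter (fun c => c ≠ k)
      = PySem.List.pyRange (k + 1) b 1 := by
    rw [List.filter_cons]
    simp only [decide_not]
    rw [List.filter_eq_self.mpr]
    · simp
    · intro x hx
      have := (PySem.List.mem_pyRange_one).mp hx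
      simp; omega
  rw [h1, h2]

-- ===== VERDICT (by name: the statement is the Claim_ definition above) =====
theorem available_row_range_spec : Claim_equal_available_row_range := by
  intro row obj_col _hdom hpre
  obtain ⟨h0, hlen⟩ := hpre
  unfold Spec_available_row_range available_row_range available_row_range_alt
  set k := obj_col.toNat with hk
  have hko : obj_col = (k : Int) := by omega
  rw [hko]
  simp only [loop1_eq_growLeft, loop2_eq_growRight]
  set L := growLeft row (k : Int) with hL
  set R := growRight row (k : Int) with hR
  have hLk : L ≤ (k : Int) := growLeft_le row (k : Int)
  have hkR : (k : Int) < R + 1 := by have := le_growRight row (k : Int); omega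
  have hmem : (k : Int) ∈ PySem.List.pyRange L (R + 1) 1 :=
    (PySem.List.mem_pyRange_one).mpr ⟨hLk, hkR⟩
  rw [PySem.List.remove?_eq_some_erase _ _ hmem, Option.getD_some]
  exact range_erase_eq_filter _ _ _ hLk hkR
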